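-- pv_equiv track=rewrite | github.com/matiturock/python-pujol | ejercicio-1.py | calcular_total_gastos_estudio
-- ===== SOURCE A (Python) =====
-- def calcular_total_gastos_estudio(codigo_paciente: str) -> int:
--     lista = codigo_paciente.split(",")
--     codigos_de_estudios = lista[1][2:]
--     cantidad_de_bloques = len(codigos_de_estudios) // 4
--
--     gastos_estudio = 0
--     indice = 0
--     for _ in range(cantidad_de_bloques):
--         letra = codigos_de_estudios[indice]
--         indice += 4
--
--         match letra:
--             case "A":
--                 gastos_estudio += 300
--             case "E":
--                 gastos_estudio += 420
--             case "I":
--                 gastos_estudio += 670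
--             case _:
--                 pass
--
--     return gastos_estudio
-- ===== SOURCE B (Python) =====
-- def calcular_total_gastos_estudio(codigo_paciente: str) -> int:
--     precios = {"A": 300, "E": 420, "I": 670}
--     resto = codigo_paciente.split(",")[1][2:]
--     total = 0
--     while len(resto) >= 4:
--         total += precios.get(resto[0], 0)
--         resto = resto[4:]
--     return total
-- ===== Notes on version B (the rewrite author's own statement) =====
-- stated objective: alternative
-- what changed: Replaces A's counted for-range loop (precomputed block count, an index stepped by 4, a match/case price ladder) by structural recursion on the string itself: a price dict and a while that consumes the suffix four characters at a time (resto = resto[4:]) until fewer than four remain, so no block count or index arithmetic exists in B.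
import Mathlib
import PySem

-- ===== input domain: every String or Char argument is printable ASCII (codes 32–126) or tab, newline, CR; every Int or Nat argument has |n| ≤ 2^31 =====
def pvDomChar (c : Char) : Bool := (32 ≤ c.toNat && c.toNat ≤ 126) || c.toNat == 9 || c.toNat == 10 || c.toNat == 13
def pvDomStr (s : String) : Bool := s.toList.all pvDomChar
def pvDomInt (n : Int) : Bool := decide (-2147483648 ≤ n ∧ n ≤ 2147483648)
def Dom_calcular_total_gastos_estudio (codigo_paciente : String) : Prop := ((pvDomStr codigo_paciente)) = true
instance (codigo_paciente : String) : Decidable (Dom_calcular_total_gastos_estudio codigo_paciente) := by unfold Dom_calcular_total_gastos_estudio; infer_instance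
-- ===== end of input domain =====

-- B replaces A's counted index-stepping loop (block count + index += 4 + match/case ladder)
-- by structural recursion on the string: a price dict and a while consuming four characters
-- of the suffix at a time until fewer than four remain (objective: alternative).

-- ===== PORT A =====
-- the for-range loop of A: state (gastos, indice), one step per block
def pvLoopA (cs : List Char) (gastos : Int) (indice : Int) : Nat → Int
  | 0 => gastos
  | k + 1 =>
    -- letra = codigos_de_estudios[indice]  (always in range when reached; default unreachable)
    let letra := PySem.List.pyGetD cs indice ' '
    let indice' := indice + 4
    let gastos' :=
      if letra = 'A' then gastos + 300
      else if letra = 'E' then gastos + 420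
      else if letra = 'I' then gastos + 670
      else gastos
    pvLoopA cs gastos' indice' k

def calcular_total_gastos_estudio (codigo_paciente : String) : Int :=
  match PySem.Str.split? codigo_paciente "," with
  | none => 0   -- unreachable: "," ≠ ""
  | some lista =>
    match PySem.List.pyGet? lista 1 with
    | none => 0  -- IndexError (no "," in the input); excluded by Pre_
    | some l1 =>
      let codigos := (PySem.Str.slice l1 (some 2) none).toList
      let bloques := PySem.Int.floordiv codigos.length 4
      pvLoopA codigos 0 0 bloques.toNat

-- ===== PORT B =====
-- precios = {"A": 300, "E": 420, "I": 670}
def pvPrecios : PySem.Dict Char Int := PySem.Dict.ofList [('A', 300), ('E', 420), ('I', 670)]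

-- the while loop of B: consume the suffix four characters at a time
def pvLoopB (resto : List Char) (total : Int) : Int :=
  if 4 ≤ resto.length then
    pvLoopB (resto.drop 4) (total + PySem.Dict.getD pvPrecios (PySem.List.pyGetD resto 0 ' ') 0)
  else total
termination_by resto.length
decreasing_by simp [List.length_drop]; omega

def calcular_total_gastos_estudio_alt (codigo_paciente : String) : Int :=
  match PySem.Str.split? codigo_paciente "," with
  | none => 0   -- unreachable: "," ≠ ""
  | some lista =>
    match PySem.List.pyGet? lista 1 with
    | none => 0  -- IndexError (no "," in the input); excluded by Pre_
    | some l1 =>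
      pvLoopB (PySem.Str.slice l1 (some 2) none).toList 0

-- ===== PRECONDITION & SPEC =====
-- Pre_ excludes exactly the inputs without a comma, on which A raises IndexError at lista[1] (B raises the same way).
def Pre_calcular_total_gastos_estudio (codigo_paciente : String) : Prop :=
  PySem.Str.isIn "," codigo_paciente = true
instance (codigo_paciente : String) : Decidable (Pre_calcular_total_gastos_estudio codigo_paciente) := by
  unfold Pre_calcular_total_gastos_estudio; infer_instance

def pvWitness_calcular_total_gastos_estudio : String := "p1,01AxxxExxx"

def Spec_calcular_total_gastos_estudio (codigo_paciente : String) (out : Int) : Prop :=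
  out = calcular_total_gastos_estudio_alt codigo_paciente
instance (codigo_paciente : String) (out : Int) : Decidable (Spec_calcular_total_gastos_estudio codigo_paciente out) := by
  unfold Spec_calcular_total_gastos_estudio; infer_instance

-- ===== CLAIM (what is proved, stated in full; the proofs are below) =====
def Claim_equal_calcular_total_gastos_estudio : Prop :=
  ∀ (codigo_paciente : String), Dom_calcular_total_gastos_estudio codigo_paciente →
    Pre_calcular_total_gastos_estudio codigo_paciente →
    Spec_calcular_total_gastos_estudio codigo_paciente (calcular_total_gastos_estudio codigo_paciente)

-- ===== LEMMAS AND PROOFS =====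

-- price of one block-leading letter (proof-side abstraction of both programs' tables)
def pvPrecio (c : Char) : Int :=
  if c = 'A' then 300 else if c = 'E' then 420 else if c = 'I' then 670 else 0

theorem pvPrecios_getD (c : Char) : PySem.Dict.getD pvPrecios c 0 = pvPrecio c := by
  have hit : pvPrecios = PySem.Dict.mk [('A', 300), ('E', 420), ('I', 670)] := by decide
  rw [hit, PySem.Dict.getD, PySem.Dict.get?_mk_cons, PySem.Dict.get?_mk_cons,
    PySem.Dict.get?_mk_cons]
  simp only [beq_iff_eq]
  split_ifs with h1 h2 h3
  · subst h1; simp [pvPrecio]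
  · subst h2; simp [pvPrecio]
  · subst h3; simp [pvPrecio]
  · have nA : ¬ c = 'A' := fun h => h1 h.symm
    have nE : ¬ c = 'E' := fun h => h2 h.symm
    have nI : ¬ c = 'I' := fun h => h3 h.symm
    simp [pvPrecio, nA, nE, nI, PySem.Dict.get?, List.find?]

-- the if-chain of one A-loop step, as adding pvPrecio
theorem pv_if_add (g : Int) (c : Char) :
    (if c = 'A' then g + 300 else if c = 'E' then g + 420 else if c = 'I' then g + 670 else g)
      = g + pvPrecio c := by
  unfold pvPrecio; split_ifs <;> ring

-- A's loop computes the sum of prices of cs[j], cs[j+4], …, k terms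
theorem pvLoopA_eq (k : Nat) : ∀ (cs : List Char) (g : Int) (j : Nat),
    pvLoopA cs g (j : Int) k
      = g + (((List.range k).map (fun i => pvPrecio (cs.getD (j + 4 * i) ' '))).sum) := by
  induction k with
  | zero => intro cs g j; simp [pvLoopA]
  | succ k ih =>
    intro cs g j
    have hcast : (j : Int) + 4 = ((j + 4 : Nat) : Int) := by push_cast; ring
    have h1 : pvLoopA cs g (j : Int) (k + 1)
        = pvLoopA cs (g + pvPrecio (cs.getD j ' ')) ((j + 4 : Nat) : Int) k := by
      simp only [pvLoopA, PySem.List.pyGetD_natCast, hcast, pv_if_add]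
    rw [h1, ih, List.range_succ_eq_map, List.map_cons, List.sum_cons, List.map_map]
    have hfun : ((fun i => pvPrecio (cs.getD (j + 4 * i) ' ')) ∘ Nat.succ)
        = (fun i => pvPrecio (cs.getD (j + 4 + 4 * i) ' ')) := by
      funext i
      simp only [Function.comp_apply, Nat.succ_eq_add_one]
      rw [show j + 4 * (i + 1) = j + 4 + 4 * i from by omega]
    rw [hfun]
    ring_nf

-- B's loop computes the same sum of prices of cs[0], cs[4], …, len/4 terms
theorem pvLoopB_eq (cs : List Char) (g : Int) :
    pvLoopB cs g
      = g + (((List.range (cs.length / 4)).map (fun i => pvPrecio (cs.getD (4 * i) ' '))).sum) := by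
  induction cs, g using pvLoopB.induct with
  | case1 resto total h ih =>
    rw [pvLoopB, if_pos h, ih]
    have hlen : (resto.drop 4).length = resto.length - 4 := by simp
    have hb : resto.length / 4 = (resto.length - 4) / 4 + 1 := by omega
    rw [hb, List.range_succ_eq_map, List.map_cons, List.sum_cons, List.map_map, hlen]
    have hfun : ((fun i => pvPrecio (resto.getD (4 * i) ' ')) ∘ Nat.succ)
        = (fun i => pvPrecio ((resto.drop 4).getD (4 * i) ' ')) := by
      funext i
      simp only [Function.comp_apply, Nat.succ_eq_add_one, List.getD_eq_getElem?_getD,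
        List.getElem?_drop]
      rw [show 4 * (i + 1) = 4 + 4 * i from by omega]
    rw [hfun]
    have h0 : PySem.List.pyGetD resto 0 ' ' = resto.getD 0 ' ' := PySem.List.pyGetD_zero resto ' '
    rw [h0, pvPrecios_getD]
    simp only [Nat.mul_zero]
    ring
  | case2 resto total h =>
    rw [pvLoopB, if_neg h]
    have : resto.length / 4 = 0 := by omega
    simp [this]

theorem pv_floordiv4 (n : Nat) : PySem.Int.floordiv (n : Int) 4 = ((n / 4 : Nat) : Int) := by
  rw [PySem.Int.floordiv, Int.fdiv_eq_ediv]
  simp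

theorem pv_main (cs : List Char) :
    pvLoopA cs 0 0 (PySem.Int.floordiv cs.length 4).toNat = pvLoopB cs 0 := by
  rw [pv_floordiv4, Int.toNat_natCast, pvLoopB_eq]
  have h0 := pvLoopA_eq (cs.length / 4) cs 0 0
  simp only [Nat.cast_zero] at h0
  rw [h0]
  simp only [Nat.zero_add]

-- ===== VERDICT (by name: the statement is the Claim_ definition above) =====
theorem calcular_total_gastos_estudio_spec : Claim_equal_calcular_total_gastos_estudio := by
  intro s _ _
  unfold Spec_calcular_total_gastos_estudio
  unfold calcular_total_gastos_estudio calcular_total_gastos_estudio_alt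
  generalize PySem.Str.split? s "," = r
  cases r with
  | none => rfl
  | some lista =>
    dsimp only
    generalize PySem.List.pyGet? lista 1 = r2
    cases r2 with
    | none => rfl
    | some l1 => exact pv_main ((PySem.Str.slice l1 (some 2) none).toList)
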